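-- pv_equiv track=rewrite | github.com/tox-dev/tox-travis | tox_travis.py | match_envs
-- ===== SOURCE A (Python) =====
-- def match_envs(declared_envs, desired_envs):
--     """Determine the envs that match the desired_envs.
--
--     Envs in the desired_envs that do not match any env in the
--     declared_envs are appended to the list of matches verbatim.
--     """
--     matched = [
--         declared for declared in declared_envs
--         if any(env_matches(declared, desired) for desired in desired_envs)
--     ]
--     unmatched = [
--         desired for desired in desired_envs
--         if not any(env_matches(declared, desired) for declared in declared_envs)
--     ]
--     return matched + unmatched
--
-- def env_matches(declared, desired):
--     """Determine if a declared env matches a desired env.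
--
--     Rather than simply using the name of the env verbatim, take a
--     closer look to see if all the desired factors are fulfilled. If
--     the desired factors are fulfilled, but there are other factors,
--     it should still match the env.
--     """
--     desired_factors = desired.split('-')
--     declared_factors = declared.split('-')
--     return all(factor in declared_factors for factor in desired_factors)
-- ===== SOURCE B (Python) =====
-- def env_matches(declared, desired):
--     """A declared env matches a desired env iff the desired factors
--     form a subset of the declared factors."""
--     return set(desired.split('-')) <= set(declared.split('-'))
--
--
-- def match_envs(declared_envs, desired_envs):
--     """Single fused pass over declared_envs: collect matched declared envs
--     while recording every desired env that was covered; desired envs never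
--     covered are appended verbatim."""
--     matched = []
--     covered = set()
--     for declared in declared_envs:
--         hit = False
--         for desired in desired_envs:
--             if env_matches(declared, desired):
--                 covered.add(desired)
--                 hit = True
--         if hit:
--             matched.append(declared)
--     return matched + [d for d in desired_envs if d not in covered]
-- ===== Notes on version B (the rewrite author's own statement) =====
-- stated objective: alternative
-- what changed: Replaces A's two independent comprehensions (each re-scanning the other list with any()) by one fused pass over declared_envs that both selects matched declared envs and accumulates a covered set of desired envs, so unmatched desired envs are found by a set lookup instead of a second nested scan; factor matching uses set inclusion instead of all()+list membership.
import Mathlib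
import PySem

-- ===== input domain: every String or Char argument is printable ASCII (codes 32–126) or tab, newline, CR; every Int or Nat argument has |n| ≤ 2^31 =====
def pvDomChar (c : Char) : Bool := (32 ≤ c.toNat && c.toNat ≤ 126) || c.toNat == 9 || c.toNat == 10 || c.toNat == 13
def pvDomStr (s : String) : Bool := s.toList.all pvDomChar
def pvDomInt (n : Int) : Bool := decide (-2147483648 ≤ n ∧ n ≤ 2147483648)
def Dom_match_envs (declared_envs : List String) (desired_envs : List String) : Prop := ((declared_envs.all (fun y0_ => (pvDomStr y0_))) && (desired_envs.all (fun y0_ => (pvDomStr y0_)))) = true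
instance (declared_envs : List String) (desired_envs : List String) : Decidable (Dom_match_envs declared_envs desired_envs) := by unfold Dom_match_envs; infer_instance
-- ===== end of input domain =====

-- B fuses A's two independent comprehensions into one pass over declared_envs that also accumulates a covered set of desired envs (objective: alternative decomposition, same cost).

-- ===== PORT A =====
-- s.split('-') with the non-empty separator "-" never raises; split? returns some here, getD [] only discharges the option.
def env_matches (declared : String) (desired : String) : Bool :=
  ((PySem.Str.split? desired "-").getD []).all
    (fun factor => ((PySem.Str.split? declared "-").getD []).contains factor)

def match_envs (declared_envs : List String) (desired_envs : List String) : List String :=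
  let matched := declared_envs.filter
    (fun declared => desired_envs.any (fun desired => env_matches declared desired))
  let unmatched := desired_envs.filter
    (fun desired => !(declared_envs.any (fun declared => env_matches declared desired)))
  matched ++ unmatched

-- ===== PORT B =====
def env_matches_b (declared : String) (desired : String) : Bool :=
  PySem.Set.issubset (PySem.Set.ofList ((PySem.Str.split? desired "-").getD []))
                     (PySem.Set.ofList ((PySem.Str.split? declared "-").getD []))

def match_envs_alt (declared_envs : List String) (desired_envs : List String) : List String :=
  let fin := declared_envs.foldl
    (fun (st : List String × PySem.Set String) declared =>
      let inner := desired_envs.foldl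
        (fun (ih : PySem.Set String × Bool) desired =>
          if env_matches_b declared desired then (PySem.Set.add ih.1 desired, true) else ih)
        (st.2, false)
      (if inner.2 then st.1 ++ [declared] else st.1, inner.1))
    ([], PySem.Set.empty)
  fin.1 ++ desired_envs.filter (fun d => !(PySem.Set.contains fin.2 d))

-- ===== PRECONDITION & SPEC =====
def Spec_match_envs (declared_envs : List String) (desired_envs : List String) (out : List String) : Prop := out = match_envs_alt declared_envs desired_envs
instance (declared_envs : List String) (desired_envs : List String) (out : List String) : Decidable (Spec_match_envs declared_envs desired_envs out) := by unfold Spec_match_envs; infer_instance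

-- ===== CLAIM (what is proved, stated in full; the proofs are below) =====
def Claim_equal_match_envs : Prop := ∀ (declared_envs : List String) (desired_envs : List String), Dom_match_envs declared_envs desired_envs → Spec_match_envs declared_envs desired_envs (match_envs declared_envs desired_envs)

-- ===== LEMMAS AND PROOFS =====

theorem env_matches_b_eq (declared desired : String) :
    env_matches_b declared desired = env_matches declared desired := by
  rw [env_matches_b, env_matches, Bool.eq_iff_iff]
  rw [PySem.Set.issubset_iff]
  simp [PySem.Set.mem_ofList, List.all_eq_true]

theorem inner_fold_spec (declared : String) (des : List String)
    (cov : PySem.Set String) (b : Bool) :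
    (des.foldl
        (fun (ih : PySem.Set String × Bool) desired =>
          if env_matches_b declared desired then (PySem.Set.add ih.1 desired, true) else ih)
        (cov, b)).2 = (b || des.any (fun d => env_matches_b declared d)) ∧
    ∀ x, (x ∈ (des.foldl
        (fun (ih : PySem.Set String × Bool) desired =>
          if env_matches_b declared desired then (PySem.Set.add ih.1 desired, true) else ih)
        (cov, b)).1 ↔ x ∈ cov ∨ (x ∈ des ∧ env_matches_b declared x = true)) := by
  induction des generalizing cov b with
  | nil => simp
  | cons d t ih =>
    simp only [List.foldl_cons, List.any_cons]
    by_cases h : env_matches_b declared d = true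
    · rw [if_pos h]
      obtain ⟨h1, h2⟩ := ih (PySem.Set.add cov d) true
      refine ⟨by simp [h1, h], fun x => ?_⟩
      rw [h2 x, PySem.Set.mem_add]
      constructor
      · rintro (⟨hc | he⟩ | ⟨hm, hp⟩)
        · exact Or.inl hc
        · exact Or.inr ⟨by simp [he], by rwa [he]⟩
        · exact Or.inr ⟨List.mem_cons_of_mem _ hm, hp⟩
      · rintro (hc | ⟨hm, hp⟩)
        · exact Or.inl (Or.inl hc)
        · rcases List.mem_cons.mp hm with he | hm'
          · exact Or.inl (Or.inr he)
          · exact Or.inr ⟨hm', hp⟩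
    · rw [if_neg h]
      obtain ⟨h1, h2⟩ := ih cov b
      refine ⟨by simp [h1, h], fun x => ?_⟩
      rw [h2 x]
      constructor
      · rintro (hc | ⟨hm, hp⟩)
        · exact Or.inl hc
        · exact Or.inr ⟨List.mem_cons_of_mem _ hm, hp⟩
      · rintro (hc | ⟨hm, hp⟩)
        · exact Or.inl hc
        · rcases List.mem_cons.mp hm with he | hm'
          · exact absurd (by rwa [he] at hp) h
          · exact Or.inr ⟨hm', hp⟩

theorem outer_fold_spec (de des : List String)
    (acc : List String) (cov : PySem.Set String) :
    (de.foldl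
        (fun (st : List String × PySem.Set String) declared =>
          let inner := des.foldl
            (fun (ih : PySem.Set String × Bool) desired =>
              if env_matches_b declared desired then (PySem.Set.add ih.1 desired, true) else ih)
            (st.2, false)
          (if inner.2 then st.1 ++ [declared] else st.1, inner.1)) (acc, cov)).1
      = acc ++ de.filter (fun declared => des.any (fun d => env_matches_b declared d)) ∧
    ∀ x, (x ∈ (de.foldl
        (fun (st : List String × PySem.Set String) declared =>
          let inner := des.foldl
            (fun (ih : PySem.Set String × Bool) desired =>
              if env_matches_b declared desired then (PySem.Set.add ih.1 desired, true) else ih)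
            (st.2, false)
          (if inner.2 then st.1 ++ [declared] else st.1, inner.1)) (acc, cov)).2
      ↔ x ∈ cov ∨ ∃ dec ∈ de, env_matches_b dec x = true ∧ x ∈ des) := by
  induction de generalizing acc cov with
  | nil => simp
  | cons dec t ih =>
    simp only [List.foldl_cons]
    obtain ⟨i1, i2⟩ := inner_fold_spec dec des cov false
    simp only [i1, Bool.false_or]
    obtain ⟨o1, o2⟩ := ih (if des.any (fun d => env_matches_b dec d) then acc ++ [dec] else acc)
      ((des.foldl
        (fun (ih : PySem.Set String × Bool) desired =>
          if env_matches_b dec desired then (PySem.Set.add ih.1 desired, true) else ih)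
        (cov, false)).1)
    constructor
    · rw [o1, List.filter_cons]
      by_cases h : des.any (fun d => env_matches_b dec d) = true
      · simp [h, List.append_assoc]
      · simp [h]
    · intro x
      rw [o2 x, i2 x]
      constructor
      · rintro ((hc | ⟨hm, hp⟩) | ⟨d', hd', hp', hm'⟩)
        · exact Or.inl hc
        · exact Or.inr ⟨dec, List.mem_cons_self .., hp, hm⟩
        · exact Or.inr ⟨d', List.mem_cons_of_mem _ hd', hp', hm'⟩
      · rintro (hc | ⟨d', hd', hp', hm'⟩)
        · exact Or.inl (Or.inl hc)
        · rcases List.mem_cons.mp hd' with he | hm''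
          · exact Or.inl (Or.inr ⟨hm', by rwa [← he]⟩)
          · exact Or.inr ⟨d', hm'', hp', hm'⟩

theorem match_envs_spec : Claim_equal_match_envs := by
  intro de des _
  unfold Spec_match_envs
  simp only [match_envs, match_envs_alt]
  obtain ⟨o1, o2⟩ := outer_fold_spec de des [] PySem.Set.empty
  rw [o1, List.nil_append]
  congr 1
  · apply List.filter_congr
    intro x _
    simp [env_matches_b_eq]
  · apply List.filter_congr
    intro x hx
    congr 1
    rw [Bool.eq_iff_iff]
    simp only [PySem.Set.contains, List.contains_iff_mem, List.any_eq_true]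
    rw [o2 x]
    simp only [PySem.Set.empty, List.not_mem_nil, false_or]
    constructor
    · rintro ⟨d', hd', hp'⟩
      exact ⟨d', hd', by rwa [env_matches_b_eq], hx⟩
    · rintro ⟨d', hd', hp', _⟩
      exact ⟨d', hd', by rwa [env_matches_b_eq] at hp'⟩
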